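-- pv_equiv track=rewrite | github.com/BrianLusina/PythonSnips | puzzles/cake_is_not_a_lie/__init__.py | cake_is_not_a_lie
-- ===== SOURCE A (Python) =====
-- def cake_is_not_a_lie(s: str) -> int:
--     str_len = len(s)
--     for x in range(1, str_len + 1):
--         part = s[:x]
--         count = s.count(part)
--         if count * x == str_len:
--             return count
--     else:
--         return 0
-- ===== SOURCE B (Python) =====
-- def cake_is_not_a_lie(s: str) -> int:
--     n = len(s)
--     for d in range(1, n + 1):
--         if n % d:
--             continue
--         q = n // d
--         if s[:d] * q == s:
--             return q
--     return 0
-- ===== Notes on version B (the rewrite author's own statement) =====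
-- stated objective: faster
-- what changed: A scans every prefix length and runs a full greedy substring count over s for each; B tests only the divisors of len(s) and checks tiling directly by comparing s with the replicated prefix, skipping the per-length occurrence counting entirely.
import Mathlib
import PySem

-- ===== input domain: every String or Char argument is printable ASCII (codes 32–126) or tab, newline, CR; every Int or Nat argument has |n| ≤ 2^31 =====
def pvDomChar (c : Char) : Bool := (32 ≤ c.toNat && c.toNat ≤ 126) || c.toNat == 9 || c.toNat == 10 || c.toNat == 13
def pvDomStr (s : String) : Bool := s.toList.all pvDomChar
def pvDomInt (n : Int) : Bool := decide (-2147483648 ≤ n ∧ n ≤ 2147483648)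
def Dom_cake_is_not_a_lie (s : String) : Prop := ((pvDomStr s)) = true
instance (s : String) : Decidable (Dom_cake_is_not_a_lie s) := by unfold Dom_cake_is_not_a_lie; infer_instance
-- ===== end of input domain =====

-- B replaces A's per-prefix-length greedy substring count with a direct tiling test
-- over the divisors of len(s) only (objective: faster).

-- ===== PORT A =====
-- A's `for x in range(1, str_len+1)` with early return → counter recursion on x;
-- s[:x] for 0 ≤ x is List.take x; s.count(part) is PySem.Chars.count.
def cakeALoop (cs : List Char) (n : Nat) (x : Nat) : Int :=
  if x ≤ n then
    let part := cs.take x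
    let count := PySem.Chars.count cs part
    if count * x = n then (count : Int) else cakeALoop cs n (x + 1)
  else 0
termination_by n + 1 - x

def cake_is_not_a_lie (s : String) : Int :=
  cakeALoop s.toList s.toList.length 1

-- ===== PORT B =====
-- B's `for d in range(1, n+1)` with `continue` on non-divisors → counter recursion on d;
-- s[:d] * q is List.replicate q (cs.take d) flattened.
def cakeBLoop (cs : List Char) (n : Nat) (d : Nat) : Int :=
  if d ≤ n then
    if n % d ≠ 0 then cakeBLoop cs n (d + 1)
    else
      let q := n / d
      if (List.replicate q (cs.take d)).flatten = cs then (q : Int)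
      else cakeBLoop cs n (d + 1)
  else 0
termination_by n + 1 - d

def cake_is_not_a_lie_alt (s : String) : Int :=
  cakeBLoop s.toList s.toList.length 1

-- ===== PRECONDITION & SPEC =====
def Spec_cake_is_not_a_lie (s : String) (out : Int) : Prop := out = cake_is_not_a_lie_alt s
instance (s : String) (out : Int) : Decidable (Spec_cake_is_not_a_lie s out) := by unfold Spec_cake_is_not_a_lie; infer_instance

-- ===== CLAIM (what is proved, stated in full; the proofs are below) =====
def Claim_equal_cake_is_not_a_lie : Prop := ∀ (s : String), Dom_cake_is_not_a_lie s → Spec_cake_is_not_a_lie s (cake_is_not_a_lie s)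

-- ===== LEMMAS AND PROOFS =====

lemma go_zero (sub : List Char) (l : List Char) (acc : Nat) :
    PySem.Chars.count.go sub 0 l acc = acc := by
  rw [PySem.Chars.count.go]

lemma go_nil (sub : List Char) (fuel : Nat) (acc : Nat) :
    PySem.Chars.count.go sub fuel [] acc = acc := by
  cases fuel with
  | zero => rw [PySem.Chars.count.go]
  | succ fuel => rw [PySem.Chars.count.go]; simp

lemma go_cons (sub : List Char) (fuel : Nat) (h : Char) (t : List Char) (acc : Nat) :
    PySem.Chars.count.go sub (fuel + 1) (h :: t) acc =
      if sub.isPrefixOf (h :: t) then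
        PySem.Chars.count.go sub fuel ((h :: t).drop sub.length) (acc + 1)
      else PySem.Chars.count.go sub fuel t acc := by
  rw [PySem.Chars.count.go]

lemma go_acc (sub : List Char) :
    ∀ fuel l acc, PySem.Chars.count.go sub fuel l acc =
      acc + PySem.Chars.count.go sub fuel l 0 := by
  intro fuel
  induction fuel with
  | zero => intro l acc; rw [go_zero, go_zero]; omega
  | succ fuel ih =>
    intro l acc
    cases l with
    | nil => rw [go_nil, go_nil]; omega
    | cons h t =>
      rw [go_cons, go_cons]
      split
      · rw [ih _ (acc + 1), ih _ (0 + 1)]; omega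
      · exact ih t acc

lemma go_le (sub : List Char) :
    ∀ fuel l, PySem.Chars.count.go sub fuel l 0 * sub.length ≤ l.length := by
  intro fuel
  induction fuel with
  | zero => intro l; rw [go_zero]; simp
  | succ fuel ih =>
    intro l
    cases l with
    | nil => rw [go_nil]; simp
    | cons h t =>
      rw [go_cons]
      split
      · rename_i hp
        have hpre : sub <+: (h :: t) := by rwa [List.isPrefixOf_iff_prefix] at hp
        have hlen : sub.length ≤ (h :: t).length := hpre.length_le
        rw [go_acc]
        have := ih ((h :: t).drop sub.length)
        have hdl : ((h :: t).drop sub.length).length = (h :: t).length - sub.length := by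
          simp
        rw [hdl] at this
        have : (0 + 1 + PySem.Chars.count.go sub fuel ((h :: t).drop sub.length) 0) * sub.length
            = sub.length + PySem.Chars.count.go sub fuel ((h :: t).drop sub.length) 0 * sub.length := by
          ring
        omega
      · have := ih t
        simp only [List.length_cons]
        omega

lemma go_pow (sub : List Char) (hs : sub ≠ []) :
    ∀ fuel l, l.length ≤ fuel →
      (PySem.Chars.count.go sub fuel l 0 * sub.length = l.length ↔
        ∃ k, (List.replicate k sub).flatten = l) := by
  have hx : 0 < sub.length := List.length_pos_iff.mpr hs
  intro fuel
  induction fuel with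
  | zero =>
    intro l hl
    have : l = [] := List.eq_nil_of_length_eq_zero (by omega)
    subst this
    rw [go_zero]
    simp only [List.length_nil, Nat.zero_mul]
    exact ⟨fun _ => ⟨0, rfl⟩, fun _ => trivial⟩
  | succ fuel ih =>
    intro l hl
    cases l with
    | nil =>
      rw [go_nil]
      simp only [List.length_nil, Nat.zero_mul]
      exact ⟨fun _ => ⟨0, rfl⟩, fun _ => trivial⟩
    | cons h t =>
      rw [go_cons]
      by_cases hp : sub.isPrefixOf (h :: t)
      · rw [if_pos hp]
        have hpre : sub <+: (h :: t) := by rwa [List.isPrefixOf_iff_prefix] at hp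
        obtain ⟨rest, hrest⟩ := hpre
        have hdrop : (h :: t).drop sub.length = rest := by
          rw [← hrest, List.drop_left]
        have hlen : (h :: t).length = sub.length + rest.length := by
          rw [← hrest, List.length_append]
        rw [hdrop, go_acc]
        have hrl : rest.length ≤ fuel := by
          have h2 := hl
          rw [hlen] at h2
          simp only [List.length_cons] at hl
          omega
        have ihr := ih rest hrl
        constructor
        · intro hEq
          have hc : PySem.Chars.count.go sub fuel rest 0 * sub.length = rest.length := by
            have : (0 + 1 + PySem.Chars.count.go sub fuel rest 0) * sub.length
                = sub.length + PySem.Chars.count.go sub fuel rest 0 * sub.length := by ring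
            omega
          obtain ⟨k, hk⟩ := ihr.mp hc
          exact ⟨k + 1, by rw [List.replicate_succ, List.flatten_cons, hk, hrest]⟩
        · rintro ⟨k, hk⟩
          cases k with
          | zero => simp at hk
          | succ k =>
            rw [List.replicate_succ, List.flatten_cons] at hk
            have hk' : (List.replicate k sub).flatten = rest := by
              have := hk.trans hrest.symm
              exact List.append_cancel_left this
            have hc := ihr.mpr ⟨k, hk'⟩
            have : (0 + 1 + PySem.Chars.count.go sub fuel rest 0) * sub.length
                = sub.length + PySem.Chars.count.go sub fuel rest 0 * sub.length := by ring
            omega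
      · rw [if_neg hp]
        apply iff_of_false
        · have := go_le sub fuel t
          simp only [List.length_cons]
          omega
        · rintro ⟨k, hk⟩
          cases k with
          | zero => simp at hk
          | succ k =>
            rw [List.replicate_succ, List.flatten_cons] at hk
            have : sub <+: (h :: t) := ⟨(List.replicate k sub).flatten, hk⟩
            rw [← List.isPrefixOf_iff_prefix] at this
            exact hp this

lemma len_flatten_rep (sub : List Char) (k : Nat) :
    ((List.replicate k sub).flatten).length = k * sub.length := by
  induction k with
  | zero => simp
  | succ k ih => rw [List.replicate_succ, List.flatten_cons, List.length_append, ih]; ring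

lemma PA_iff (cs : List Char) (x : Nat) (hx1 : 1 ≤ x) (hxn : x ≤ cs.length) :
    (PySem.Chars.count cs (cs.take x) * x = cs.length ↔
      cs.length % x = 0 ∧ (List.replicate (cs.length / x) (cs.take x)).flatten = cs) := by
  have hsl : (cs.take x).length = x := by simp; omega
  have hne : cs.take x ≠ [] := by
    intro h; rw [h] at hsl; simp at hsl; omega
  have hcount : PySem.Chars.count cs (cs.take x) =
      PySem.Chars.count.go (cs.take x) cs.length cs 0 := by
    rw [PySem.Chars.count, if_neg]
    simp [List.isEmpty_iff, hne]
  rw [hcount]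
  have hpow := go_pow (cs.take x) hne cs.length cs le_rfl
  rw [hsl] at hpow
  rw [hpow]
  constructor
  · rintro ⟨k, hk⟩
    have hklen : k * x = cs.length := by
      rw [← hk, len_flatten_rep, hsl]
    have hdiv : cs.length / x = k := by
      rw [← hklen, Nat.mul_div_cancel k (by omega)]
    refine ⟨?_, by rw [hdiv]; exact hk⟩
    rw [← hklen]
    exact Nat.mul_mod_left k x
  · rintro ⟨_, hfl⟩
    exact ⟨cs.length / x, hfl⟩

lemma loops_eq (cs : List Char) :
    ∀ m x, 1 ≤ x → cs.length + 1 - x ≤ m →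
      cakeALoop cs cs.length x = cakeBLoop cs cs.length x := by
  intro m
  induction m with
  | zero =>
    intro x _ hm
    rw [cakeALoop, cakeBLoop, if_neg (by omega), if_neg (by omega)]
  | succ m ih =>
    intro x hx1 hm
    by_cases hle : x ≤ cs.length
    · rw [cakeALoop, cakeBLoop, if_pos hle, if_pos hle]
      have hiff := PA_iff cs x hx1 hle
      by_cases hPA : PySem.Chars.count cs (cs.take x) * x = cs.length
      · obtain ⟨hmod, hfl⟩ := hiff.mp hPA
        rw [if_pos hPA, if_neg (by simpa using hmod)]
        simp only [if_pos hfl]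
        have hcdiv : PySem.Chars.count cs (cs.take x) = cs.length / x := by
          rw [← hPA, Nat.mul_div_cancel _ (by omega)]
        rw [hcdiv]
      · rw [if_neg hPA]
        have hrec := ih (x + 1) (by omega) (by omega)
        by_cases hmod : cs.length % x = 0
        · have hfl : ¬ (List.replicate (cs.length / x) (cs.take x)).flatten = cs := by
            intro hfl; exact hPA (hiff.mpr ⟨hmod, hfl⟩)
          rw [if_neg (by simpa using hmod)]
          simp only [if_neg hfl]
          exact hrec
        · rw [if_pos (by simpa using hmod)]
          exact hrec
    · rw [cakeALoop, cakeBLoop, if_neg hle, if_neg hle]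

-- ===== VERDICT (by name: the statement is the Claim_ definition above) =====
theorem cake_is_not_a_lie_spec : Claim_equal_cake_is_not_a_lie := by
  intro s _
  unfold Spec_cake_is_not_a_lie cake_is_not_a_lie cake_is_not_a_lie_alt
  exact loops_eq s.toList (s.toList.length + 1) 1 le_rfl (by omega)
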